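-- pv_equiv track=rewrite | github.com/KJstudio1171/algorithm | 프로그래머스/문자열_내_p와_y의_개수.py | solution
-- ===== SOURCE A (Python) =====
-- def solution(s):
--     (a, b) = (0, 0)
--     for i in s.upper():
--         if i in ['P', 'Y']:
--             a += 1
--         if i in ['p', 'P']:
--             b += 1
--     return a == b
-- ===== SOURCE B (Python) =====
-- def solution(s):
--     # After s.upper() the second counter of A can never see 'p', so the two
--     # counters agree exactly when no 'Y' occurs: a single absence test suffices.
--     return 'Y' not in s.upper()
-- ===== Notes on version B (the rewrite author's own statement) =====
-- stated objective: simpler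
-- what changed: Replaces the dual-counter accumulating loop over the upper-cased string with a single substring-absence membership test, using the fact that the two counters agree iff the letter y never occurs.
import Mathlib
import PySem

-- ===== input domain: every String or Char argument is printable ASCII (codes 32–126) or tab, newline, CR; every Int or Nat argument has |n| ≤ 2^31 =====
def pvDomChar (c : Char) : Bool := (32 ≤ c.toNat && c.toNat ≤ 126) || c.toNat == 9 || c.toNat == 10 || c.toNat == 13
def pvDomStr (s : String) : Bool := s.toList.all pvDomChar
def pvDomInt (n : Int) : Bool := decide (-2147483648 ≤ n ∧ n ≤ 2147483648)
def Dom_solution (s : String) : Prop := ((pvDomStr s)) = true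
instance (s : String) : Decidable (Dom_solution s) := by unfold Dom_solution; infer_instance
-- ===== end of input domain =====

-- B replaces A's dual-counter loop with one substring-absence test ('Y' not in s.upper()); simpler, same cost.

-- ===== PORT A =====
def solution (s : String) : Bool :=
  let r := (PySem.Str.upper s).toList.foldl
    (fun (ab : Int × Int) i =>
      (if ['P', 'Y'].contains i then ab.1 + 1 else ab.1,
       if ['p', 'P'].contains i then ab.2 + 1 else ab.2)) (0, 0)
  r.1 == r.2

-- ===== PORT B =====
-- Python's `'Y' not in s.upper()` : substring membership, ported with PySem.Str.isIn.
def solution_alt (s : String) : Bool := !(PySem.Str.isIn "Y" (PySem.Str.upper s))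

-- ===== PRECONDITION & SPEC =====
def Spec_solution (s : String) (out : Bool) : Prop := out = solution_alt s
instance (s : String) (out : Bool) : Decidable (Spec_solution s out) := by unfold Spec_solution; infer_instance

-- ===== CLAIM (what is proved, stated in full; the proofs are below) =====
def Claim_equal_solution : Prop := ∀ (s : String), Dom_solution s → Spec_solution s (solution s)

-- ===== LEMMAS AND PROOFS =====

theorem upperChar_ne_p (c : Char) : PySem.Chars.upperChar c ≠ 'p' := by
  unfold PySem.Chars.upperChar PySem.Chars.islower
  split
  · rename_i h
    simp only [Bool.and_eq_true, decide_eq_true_eq, Char.le_def] at h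
    intro hc
    have h1 : 97 ≤ c.toNat := h.1
    have h2 : c.toNat ≤ 122 := h.2
    have := congrArg Char.toNat hc
    rw [Char.toNat_ofNat, if_pos (Or.inl (by omega : c.toNat - 32 < 0xd800))] at this
    have hp : ('p' : Char).toNat = 112 := rfl
    omega
  · rename_i h
    intro hc; subst hc
    simp at h

theorem mem_upper_ne_p (l : List Char) (c : Char) (h : c ∈ PySem.Chars.upper l) : c ≠ 'p' := by
  unfold PySem.Chars.upper at h
  obtain ⟨d, _, rfl⟩ := List.mem_map.mp h
  exact upperChar_ne_p d

theorem fold_counts (u : List Char) (a b : Int) :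
    u.foldl (fun (ab : Int × Int) i =>
      (if ['P', 'Y'].contains i then ab.1 + 1 else ab.1,
       if ['p', 'P'].contains i then ab.2 + 1 else ab.2)) (a, b)
    = (a + u.countP (fun i => ['P', 'Y'].contains i),
       b + u.countP (fun i => ['p', 'P'].contains i)) := by
  induction u generalizing a b with
  | nil => simp
  | cons c t ih =>
    simp only [List.foldl_cons, List.countP_cons, ih]
    apply Prod.ext <;> simp only [] <;> split <;> push_cast <;> ring

theorem countP_PY (u : List Char) :
    u.countP (fun i => ['P', 'Y'].contains i) = u.count 'P' + u.count 'Y' := by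
  induction u with
  | nil => simp
  | cons c t ih =>
    simp only [List.countP_cons, List.count_cons, ih]
    by_cases h1 : c = 'P' <;> by_cases h2 : c = 'Y' <;> simp_all <;> omega

theorem countP_pP (u : List Char) (hp : 'p' ∉ u) :
    u.countP (fun i => ['p', 'P'].contains i) = u.count 'P' := by
  induction u with
  | nil => simp
  | cons c t ih =>
    simp only [List.mem_cons, not_or] at hp
    simp only [List.countP_cons, List.count_cons, ih hp.2]
    by_cases h1 : c = 'P' <;> simp_all [Ne.symm hp.1]

theorem singleton_infix_iff (c : Char) (u : List Char) : [c] <:+: u ↔ c ∈ u := by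
  constructor
  · intro h; exact h.mem (by simp)
  · intro h
    obtain ⟨l1, l2, rfl⟩ := List.append_of_mem h
    exact ⟨l1, l2, by simp⟩

-- ===== VERDICT (by name: the statement is the Claim_ definition above) =====
theorem solution_spec : Claim_equal_solution := by
  intro s _
  unfold Spec_solution solution solution_alt
  simp only [PySem.Str.isIn_eq, PySem.Str.toList_upper]
  set u := PySem.Chars.upper s.toList with hu
  have hp : 'p' ∉ u := fun h => mem_upper_ne_p _ _ h rfl
  rw [fold_counts, countP_PY, countP_pP u hp]
  have hiso : PySem.Chars.isIn "Y".toList u = decide ('Y' ∈ u) := by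
    by_cases h : 'Y' ∈ u
    · rw [(PySem.Chars.isIn_iff_infix _ _).mpr]
      · simp [h]
      · exact (singleton_infix_iff 'Y' u).mpr h
    · rw [(PySem.Chars.isIn_eq_false_iff _ _).mpr]
      · simp [h]
      · exact fun hc => h ((singleton_infix_iff 'Y' u).mp hc)
  rw [hiso]
  by_cases h : 'Y' ∈ u
  · have : 0 < u.count 'Y' := List.count_pos_iff.mpr h
    simp [h]
    omega
  · have : u.count 'Y' = 0 := List.count_eq_zero.mpr h
    simp [h, this]
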